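-- pv_equiv track=rewrite | github.com/pypi-data/pypi-mirror-322 | packages/ant-auto-tool-1/ant_auto_tool_1-0.1.0-py3-none-any.whl/ant_auto_tool_1/class.py | _calculate_c_N
-- ===== SOURCE A (Python) =====
-- def _calculate_c_N(x_list, x_boundary):
--     # 确保边界列表是排序的
--     x_boundary = sorted(x_boundary)
--
--     # 初始化结果列表，用于存储每个区间的处理结果
--     c_value = []
--     N_value = []
--
--     # 遍历边界列表，形成区间并处理数据
--     for i in range(len(x_boundary) - 1):
--         left, right = x_boundary[i], x_boundary[i + 1]
--         # 找到落在当前区间的所有x值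
--         group = [x for x in x_list if left <= x < right]
--
--         # 如果该区间有元素，则进行处理
--         if group:
--             # 计算组内元素减去左边界后的和
--             sum_adjusted = sum([x - left for x in group])
--             sum_count = len(group)
--             # 将结果存储在列表中，index为右边界
--             c_value.append(sum_adjusted)
--             N_value.append(sum_count)
--
--     return c_value,N_value
-- ===== SOURCE B (Python) =====
-- def _bisect_right(b, x):
--     # standard bisect_right (cannot import bisect: A imports nothing)
--     lo, hi = 0, len(b)
--     while lo < hi:
--         mid = (lo + hi) // 2
--         if x < b[mid]:
--             hi = mid
--         else:
--             lo = mid + 1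
--     return lo
--
--
-- def _calculate_c_N(x_list, x_boundary):
--     b = sorted(x_boundary)
--     m = len(b) - 1
--     sums = [0] * m
--     counts = [0] * m
--     for x in x_list:
--         i = _bisect_right(b, x) - 1
--         if 0 <= i < m:
--             sums[i] += x - b[i]
--             counts[i] += 1
--     c_value = [s for s, n in zip(sums, counts) if n > 0]
--     N_value = [n for n in counts if n > 0]
--     return c_value, N_value
-- ===== Notes on version B (the rewrite author's own statement) =====
-- stated objective: faster
-- what changed: Instead of scanning the whole x_list once per boundary interval, B makes a single pass over x_list, locating each value's interval by binary search over the sorted boundaries and accumulating per-interval sum/count arrays, then emits the non-empty bins in order.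
import Mathlib
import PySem

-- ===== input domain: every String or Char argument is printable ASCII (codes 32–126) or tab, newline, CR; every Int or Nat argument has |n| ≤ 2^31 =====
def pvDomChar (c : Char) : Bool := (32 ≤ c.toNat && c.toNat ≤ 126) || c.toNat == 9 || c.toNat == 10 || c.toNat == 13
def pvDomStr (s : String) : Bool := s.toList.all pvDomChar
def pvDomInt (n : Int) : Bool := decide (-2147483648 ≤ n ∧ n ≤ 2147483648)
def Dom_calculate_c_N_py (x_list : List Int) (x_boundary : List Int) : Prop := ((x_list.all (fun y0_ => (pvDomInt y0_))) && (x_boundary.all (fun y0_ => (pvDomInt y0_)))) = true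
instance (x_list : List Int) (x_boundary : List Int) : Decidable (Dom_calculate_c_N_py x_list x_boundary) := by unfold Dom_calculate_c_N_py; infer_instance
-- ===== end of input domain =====

-- B replaces A's per-interval rescans of x_list by one pass that bisects each value
-- into its bin over the sorted boundaries (objective: faster, O(B·N) → O((N+B)·log B)).

-- ===== PORT A =====
def calculate_c_N_py (x_list : List Int) (x_boundary : List Int) : List Int × List Int :=
  let xb := PySem.List.sorted x_boundary (fun x => x)
  (PySem.List.pyRange 0 ((xb.length : Int) - 1) 1).foldl
    (fun (acc : List Int × List Int) i =>
      let left := PySem.List.pyGetD xb i 0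
      let right := PySem.List.pyGetD xb (i + 1) 0
      let group := x_list.filter (fun x => decide (left ≤ x) && decide (x < right))
      if group ≠ [] then
        (acc.1 ++ [(group.map (fun x => x - left)).sum], acc.2 ++ [(group.length : Int)])
      else acc)
    ([], [])

-- ===== PORT B =====
-- Source B's hand-written `_bisect_right` is exactly CPython's bisect_right loop; it is
-- ported as the prelude primitive PySem.List.bisectRight (the same fueled binary search).
def calculate_c_N_py_alt (x_list : List Int) (x_boundary : List Int) : List Int × List Int :=
  let b := PySem.List.sorted x_boundary (fun x => x)
  let m : Int := (b.length : Int) - 1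
  let sc := x_list.foldl
    (fun (sc : List Int × List Int) x =>
      let i : Int := (PySem.List.bisectRight b x : Int) - 1
      if 0 ≤ i ∧ i < m then
        (PySem.List.pySetD sc.1 i (PySem.List.pyGetD sc.1 i 0 + (x - PySem.List.pyGetD b i 0)),
         PySem.List.pySetD sc.2 i (PySem.List.pyGetD sc.2 i 0 + 1))
      else sc)
    (List.replicate m.toNat 0, List.replicate m.toNat 0)
  (((sc.1.zip sc.2).filter (fun p => decide (0 < p.2))).map (fun p => p.1),
   sc.2.filter (fun n => decide (0 < n)))

-- ===== PRECONDITION & SPEC =====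
def Spec_calculate_c_N_py (x_list : List Int) (x_boundary : List Int) (out : List Int × List Int) : Prop := out = calculate_c_N_py_alt x_list x_boundary
instance (x_list : List Int) (x_boundary : List Int) (out : List Int × List Int) : Decidable (Spec_calculate_c_N_py x_list x_boundary out) := by unfold Spec_calculate_c_N_py; infer_instance

-- ===== CLAIM (what is proved, stated in full; the proofs are below) =====
def Claim_equal_calculate_c_N_py : Prop := ∀ (x_list : List Int) (x_boundary : List Int), Dom_calculate_c_N_py x_list x_boundary → Spec_calculate_c_N_py x_list x_boundary (calculate_c_N_py x_list x_boundary)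

-- ===== LEMMAS AND PROOFS =====

-- membership predicate of bin i over the sorted boundary list b
def binPred (b : List Int) (i : Nat) (x : Int) : Bool :=
  decide (b.getD i 0 ≤ x) && decide (x < b.getD (i + 1) 0)

theorem set_map_range {β : Type} (f : Nat → β) (m j : Nat) (v : β) (hj : j < m) :
    ((List.range m).map f).set j v
      = (List.range m).map (fun i => if i = j then v else f i) := by
  apply List.ext_getElem
  · simp
  · intro k h1 h2
    simp only [List.getElem_set, List.getElem_map, List.getElem_range]
    rcases eq_or_ne k j with h | h
    · subst h; simp
    · rw [if_neg (fun hh => h hh.symm), if_neg h]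

-- bisectRight locates the unique bin
theorem bisect_bin (b : List Int) (hs : b.Pairwise (· ≤ ·)) (x : Int) (i : Nat)
    (hi : i + 1 < b.length) :
    binPred b i x = true ↔ (PySem.List.bisectRight b x : Int) - 1 = (i : Int) := by
  obtain ⟨hle, hlow, hhigh⟩ := PySem.List.bisectRight_spec b x hs
  set r := PySem.List.bisectRight b x with hr
  have hib : i < b.length := by omega
  have hgi : b.getD i 0 = b[i] := List.getD_eq_getElem b 0 hib
  have hgi1 : b.getD (i+1) 0 = b[i+1] := List.getD_eq_getElem b 0 hi
  constructor
  · intro h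
    simp only [binPred, Bool.and_eq_true, decide_eq_true_eq, hgi, hgi1] at h
    have h1 : i < r := by
      by_contra hc
      exact absurd (hhigh i hib (by omega)) (by omega)
    have h2 : r ≤ i + 1 := by
      by_contra hc
      exact absurd (hlow (i+1) hi (by omega)) (by omega)
    omega
  · intro h
    have hri : r = i + 1 := by omega
    simp only [binPred, Bool.and_eq_true, decide_eq_true_eq, hgi, hgi1]
    exact ⟨hlow i hib (by omega), hhigh (i+1) hi (by omega)⟩

-- if the bisected index is out of [0, m), no bin contains x
theorem bisect_nobin (b : List Int) (hs : b.Pairwise (· ≤ ·)) (x : Int)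
    (h : ¬ (0 ≤ (PySem.List.bisectRight b x : Int) - 1 ∧
            (PySem.List.bisectRight b x : Int) - 1 < (b.length : Int) - 1))
    (i : Nat) (hi : i + 1 < b.length) : binPred b i x = false := by
  by_contra hc
  have hb : binPred b i x = true := by
    cases hbv : binPred b i x with
    | false => exact absurd hbv hc
    | true => rfl
  have := (bisect_bin b hs x i hi).mp hb
  obtain ⟨hle, _, _⟩ := PySem.List.bisectRight_spec b x hs
  omega

-- B's accumulation loop, characterised: starting from mapped states over range m,
-- folding xs adds each bin's contribution pointwise.
theorem foldB_inv (b : List Int) (hs : b.Pairwise (· ≤ ·)) (m : Nat)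
    (hm : m = b.length - 1) (xs : List Int) :
    ∀ (f g : Nat → Int),
    xs.foldl
      (fun (sc : List Int × List Int) x =>
        let i : Int := (PySem.List.bisectRight b x : Int) - 1
        if 0 ≤ i ∧ i < (b.length : Int) - 1 then
          (PySem.List.pySetD sc.1 i (PySem.List.pyGetD sc.1 i 0 + (x - PySem.List.pyGetD b i 0)),
           PySem.List.pySetD sc.2 i (PySem.List.pyGetD sc.2 i 0 + 1))
        else sc)
      ((List.range m).map f, (List.range m).map g)
    = ((List.range m).map (fun i => f i + ((xs.filter (binPred b i)).map (fun x => x - b.getD i 0)).sum),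
       (List.range m).map (fun i => g i + ((xs.filter (binPred b i)).length : Int))) := by
  induction xs with
  | nil => intro f g; simp
  | cons x xs ih =>
    intro f g
    simp only [List.foldl_cons]
    by_cases hcase : 0 ≤ (PySem.List.bisectRight b x : Int) - 1 ∧
        (PySem.List.bisectRight b x : Int) - 1 < (b.length : Int) - 1
    · -- x falls into bin j
      set r := PySem.List.bisectRight b x with hr
      have hj : ((r : Int) - 1).toNat < m := by omega
      set j := ((r : Int) - 1).toNat with hjdef
      have hjr : (r : Int) - 1 = (j : Int) := by omega
      have hj1 : j + 1 < b.length := by omega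
      have hbinj : binPred b j x = true := (bisect_bin b hs x j hj1).mpr hjr
      have hother : ∀ i : Nat, i < m → i ≠ j → binPred b i x = false := by
        intro i him hne
        by_contra hc
        have hb : binPred b i x = true := by
          cases hbv : binPred b i x with
          | false => exact absurd hbv hc
          | true => rfl
        have := (bisect_bin b hs x i (by omega)).mp hb
        omega
      rw [if_pos hcase, hjr]
      simp only [PySem.List.pySetD_natCast, PySem.List.pyGetD_natCast]
      rw [PySem.List.getD_map_range f m j 0 hj, PySem.List.getD_map_range g m j 0 hj]
      rw [set_map_range f m j _ hj, set_map_range g m j _ hj]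
      rw [ih, Prod.mk.injEq]
      constructor <;>
      · apply List.map_congr_left
        intro i hi
        rw [List.mem_range] at hi
        by_cases hij : i = j
        · subst hij
          simp only [List.filter_cons, hbinj]
          simp
          ring
        · simp [hij, hother i hi hij]
    · rw [if_neg hcase]
      rw [ih, Prod.mk.injEq]
      constructor <;>
      · apply List.map_congr_left
        intro i hi
        rw [List.mem_range] at hi
        simp [bisect_nobin b hs x hcase i (by omega)]

-- A's loop, as a pair fold that appends under a shared condition
theorem foldl_pair_append_if {α β γ : Type} (q : α → Prop) [DecidablePred q]
    (f : α → β) (g : α → γ) (l : List α) (acc : List β × List γ) :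
    l.foldl (fun acc x => if q x then (acc.1 ++ [f x], acc.2 ++ [g x]) else acc) acc
      = (acc.1 ++ (l.filter (fun x => decide (q x))).map f,
         acc.2 ++ (l.filter (fun x => decide (q x))).map g) := by
  induction l generalizing acc with
  | nil => simp
  | cons x l ih =>
    simp only [List.foldl_cons, List.filter_cons]
    by_cases h : q x <;> simp [h, ih]

theorem map_range_eq_replicate_zero (m : Nat) :
    (List.range m).map (fun _ => (0 : Int)) = List.replicate m 0 := by
  simp [List.map_const']

theorem ne_nil_decide_eq (l : List Int) :
    (decide (l ≠ [])) = decide ((0 : Int) < (l.length : Int)) := by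
  cases l <;> simp

-- ===== VERDICT (by name: the statement is the Claim_ definition above) =====
theorem calculate_c_N_py_spec : Claim_equal_calculate_c_N_py := by
  intro xl xb _
  unfold Spec_calculate_c_N_py calculate_c_N_py calculate_c_N_py_alt
  dsimp only
  have hs := PySem.List.sorted_pairwise xb (fun x => x)
  set b := PySem.List.sorted xb (fun x => x) with hb
  set mN := b.length - 1 with hmN
  -- A side: normalize the range and indices, then apply the pair-fold shape
  rw [PySem.List.pyRange_one]
  have h1 : ((b.length : Int) - 1 - 0).toNat = mN := by omega
  rw [h1, List.foldl_map]
  simp only [zero_add]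
  have hcast1 : ∀ k : Nat, ((k : Int) + 1) = (((k + 1 : Nat) : Int)) := by intro k; push_cast; ring
  simp only [hcast1, PySem.List.pyGetD_natCast]
  conv_lhs =>
    change List.foldl (fun (acc : List Int × List Int) k =>
      if List.filter (binPred b k) xl ≠ [] then
        (acc.1 ++ [(List.map (fun x => x - b.getD k 0) (List.filter (binPred b k) xl)).sum],
         acc.2 ++ [((List.filter (binPred b k) xl).length : Int)])
      else acc) ([], []) (List.range mN)
  rw [foldl_pair_append_if
    (fun k => (xl.filter (binPred b k)) ≠ [])
    (fun k => ((xl.filter (binPred b k)).map (fun x => x - b.getD k 0)).sum)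
    (fun k => ((xl.filter (binPred b k)).length : Int))
    (List.range mN) ([], [])]
  have h2 : ((b.length : Int) - 1).toNat = mN := by omega
  rw [h2, ← map_range_eq_replicate_zero mN]
  rw [foldB_inv b hs mN hmN xl (fun _ => 0) (fun _ => 0)]
  simp only [List.nil_append, zero_add, List.zip_map', List.filter_map, List.map_map]
  rw [Prod.mk.injEq]
  simp only [Function.comp_def]
  have hfeq : List.filter (fun k => decide (List.filter (binPred b k) xl ≠ [])) (List.range mN)
      = List.filter (fun k => decide ((0 : Int) < ((List.filter (binPred b k) xl).length : Int))) (List.range mN) :=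
    List.filter_congr (fun k _ => ne_nil_decide_eq _)
  rw [hfeq]
  exact ⟨rfl, rfl⟩
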